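-- pv_equiv track=rewrite | github.com/goldsergeant/Algorithm-problem-solving | 백준/Silver/1206. 사람의 수/사람의 수.py | check
-- ===== SOURCE A (Python) =====
-- def check(cnt_people:int,averages:list):
--     for avg in averages:
--         left=0
--         right=10*cnt_people
--         is_possible = False
--         while left<=right:
--             sum_score=(left+right)//2
--             cur_avg = (sum_score*1000)//cnt_people
--
--             if cur_avg==avg:
--                 is_possible=True
--                 break
--
--             elif cur_avg>avg:
--                 right=sum_score-1
--             elif cur_avg<avg:
--                 left=sum_score+1
--
--         if not is_possible:
--             return False
--
--     return True
-- ===== SOURCE B (Python) =====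
-- def check(cnt_people: int, averages: list):
--     # Direct arithmetic test: avg is achievable iff the smallest score s >= 0 with
--     # floor(s*1000/cnt_people) >= avg (s = ceil(avg*cnt_people/1000)) lies in
--     # [0, 10*cnt_people] and actually hits avg (floor is monotone in s).
--     for avg in averages:
--         s = -((-avg * cnt_people) // 1000)
--         if s < 0:
--             s = 0
--         if not (s <= 10 * cnt_people and (s * 1000) // cnt_people == avg):
--             return False
--     return True
-- ===== Notes on version B (the rewrite author's own statement) =====
-- stated objective: faster
-- what changed: Replaces A's per-average binary search over the score range [0,10*cnt] by a direct O(1) test: compute the smallest candidate score ceil(avg*cnt/1000) (clamped to 0) and check it lies in range and floors back to avg, using monotonicity of the floor.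
import Mathlib
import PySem

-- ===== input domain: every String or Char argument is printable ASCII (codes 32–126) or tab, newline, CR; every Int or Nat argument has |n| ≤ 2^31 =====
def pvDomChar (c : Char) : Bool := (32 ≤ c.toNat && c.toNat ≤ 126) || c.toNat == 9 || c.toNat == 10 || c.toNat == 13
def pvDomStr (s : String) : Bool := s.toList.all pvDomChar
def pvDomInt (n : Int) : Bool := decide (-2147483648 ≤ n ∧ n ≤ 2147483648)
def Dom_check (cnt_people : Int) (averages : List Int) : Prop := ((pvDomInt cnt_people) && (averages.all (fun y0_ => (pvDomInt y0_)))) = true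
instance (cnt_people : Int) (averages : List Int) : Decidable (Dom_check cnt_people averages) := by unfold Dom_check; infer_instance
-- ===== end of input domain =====

-- B replaces A's per-average binary search by a direct O(1) ceiling-division test; objective: faster (O(m) vs O(m log cnt)).

-- ===== PORT A =====
-- the 'while left<=right' binary search of A, step for step
def pvBS (cnt_people avg left right : Int) : Bool :=
  if h : left ≤ right then
    let sum_score := PySem.Int.floordiv (left + right) 2
    let cur_avg := PySem.Int.floordiv (sum_score * 1000) cnt_people
    if cur_avg = avg then true
    else if cur_avg > avg then pvBS cnt_people avg left (sum_score - 1)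
    else pvBS cnt_people avg (sum_score + 1) right
  else false
termination_by (right + 1 - left).toNat
decreasing_by
  all_goals
    have hb := PySem.Int.floordiv_two_mid_bounds h
    omega

def check (cnt_people : Int) (averages : List Int) : Bool :=
  match averages with
  | [] => true
  | avg :: rest =>
      if pvBS cnt_people avg 0 (10 * cnt_people) then check cnt_people rest
      else false

-- ===== PORT B =====
def check_alt (cnt_people : Int) (averages : List Int) : Bool :=
  match averages with
  | [] => true
  | avg :: rest =>
      let s0 := -(PySem.Int.floordiv (-avg * cnt_people) 1000)
      let s := if s0 < 0 then 0 else s0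
      if s ≤ 10 * cnt_people && (PySem.Int.floordiv (s * 1000) cnt_people == avg) then
        check_alt cnt_people rest
      else false

-- ===== PRECONDITION & SPEC =====
-- Pre_ excludes cnt_people = 0 with a nonempty list: there Python A (and Python B) raise ZeroDivisionError.
def Pre_check (cnt_people : Int) (averages : List Int) : Prop :=
  averages = [] ∨ cnt_people ≠ 0
instance (cnt_people : Int) (averages : List Int) : Decidable (Pre_check cnt_people averages) := by
  unfold Pre_check; infer_instance

def pvWitness_check : Int × List Int := (3, [2000, 0])

def Spec_check (cnt_people : Int) (averages : List Int) (out : Bool) : Prop := out = check_alt cnt_people averages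
instance (cnt_people : Int) (averages : List Int) (out : Bool) : Decidable (Spec_check cnt_people averages out) := by unfold Spec_check; infer_instance

-- ===== CLAIM (what is proved, stated in full; the proofs are below) =====
def Claim_equal_check : Prop := ∀ (cnt_people : Int) (averages : List Int), Dom_check cnt_people averages → Pre_check cnt_people averages → Spec_check cnt_people averages (check cnt_people averages)

-- ===== LEMMAS AND PROOFS =====

-- floor((s*1000)/c) characterised by brackets, for 0 < c
theorem pv_f_eq_iff (c s avg : Int) (hc : 0 < c) :
    PySem.Int.floordiv (s * 1000) c = avg ↔ avg * c ≤ s * 1000 ∧ s * 1000 < (avg + 1) * c := by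
  exact PySem.Int.floordiv_eq_iff_of_pos hc

-- binary search over [l,r] finds avg iff some s in [l,r] has floor(s*1000/c)=avg (0 < c)
theorem pvBS_iff (c avg : Int) (hc : 0 < c) :
    ∀ n : Nat, ∀ l r : Int, (r + 1 - l).toNat = n →
      (pvBS c avg l r = true ↔ ∃ s, l ≤ s ∧ s ≤ r ∧ PySem.Int.floordiv (s * 1000) c = avg) := by
  intro n
  induction n using Nat.strong_induction_on with
  | _ n ih =>
    intro l r hn
    rw [pvBS]
    by_cases h : l ≤ r
    · simp only [dif_pos h]
      have hb := PySem.Int.floordiv_two_mid_bounds h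
      set m := PySem.Int.floordiv (l + r) 2 with hm
      by_cases he : PySem.Int.floordiv (m * 1000) c = avg
      · simp only [if_pos he]
        constructor
        · intro _; exact ⟨m, hb.1, hb.2, he⟩
        · intro _; trivial
      · simp only [if_neg he]
        by_cases hgt : PySem.Int.floordiv (m * 1000) c > avg
        · simp only [if_pos hgt]
          rw [ih (m - 1 + 1 - l).toNat (by omega) l (m - 1) rfl]
          constructor
          · rintro ⟨s, h1, h2, h3⟩; exact ⟨s, h1, by omega, h3⟩
          · rintro ⟨s, h1, h2, h3⟩
            refine ⟨s, h1, ?_, h3⟩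
            by_contra hs
            -- s ≥ m, so floor at s ≥ floor at m > avg, contradiction
            have hle : m * 1000 ≤ s * 1000 := by omega
            have hmono : PySem.Int.floordiv (m * 1000) c ≤ PySem.Int.floordiv (s * 1000) c := by
              rw [PySem.Int.floordiv_eq_ediv_of_pos hc, PySem.Int.floordiv_eq_ediv_of_pos hc]
              exact Int.ediv_le_ediv hc hle
            omega
        · simp only [if_neg hgt]
          have hlt : PySem.Int.floordiv (m * 1000) c < avg := by omega
          rw [ih (r + 1 - (m + 1)).toNat (by omega) (m + 1) r rfl]
          constructor
          · rintro ⟨s, h1, h2, h3⟩; exact ⟨s, by omega, h2, h3⟩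
          · rintro ⟨s, h1, h2, h3⟩
            refine ⟨s, ?_, h2, h3⟩
            by_contra hs
            have hle : s * 1000 ≤ m * 1000 := by omega
            have hmono : PySem.Int.floordiv (s * 1000) c ≤ PySem.Int.floordiv (m * 1000) c := by
              rw [PySem.Int.floordiv_eq_ediv_of_pos hc, PySem.Int.floordiv_eq_ediv_of_pos hc]
              exact Int.ediv_le_ediv hc hle
            omega
    · simp only [dif_neg h]
      constructor
      · intro hfalse; cases hfalse
      · rintro ⟨s, h1, h2, _⟩; omega

-- the per-average tests of the two ports agree for any cnt_people ≠ 0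
theorem pv_elem_eq (c avg : Int) (hc : c ≠ 0) :
    pvBS c avg 0 (10 * c) =
      ((if -(PySem.Int.floordiv (-avg * c) 1000) < 0 then 0 else -(PySem.Int.floordiv (-avg * c) 1000)) ≤ 10 * c
        && (PySem.Int.floordiv ((if -(PySem.Int.floordiv (-avg * c) 1000) < 0 then 0 else -(PySem.Int.floordiv (-avg * c) 1000)) * 1000) c == avg)) := by
  rcases lt_or_gt_of_ne hc with hneg | hpos
  · -- empty search range on the A side, candidate above the range on the B side
    rw [pvBS]
    have h1 : ¬ ((0:Int) ≤ 10 * c) := by omega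
    simp only [dif_neg h1]
    have h2 : ¬ ((if -(PySem.Int.floordiv (-avg * c) 1000) < 0 then (0:Int) else -(PySem.Int.floordiv (-avg * c) 1000)) ≤ 10 * c) := by
      split <;> omega
    symm
    rw [Bool.and_eq_false_iff]
    left
    rw [decide_eq_false_iff_not]
    exact h2
  · -- 0 < c: both sides decide ∃ s ∈ [0, 10c] with floor(s*1000/c) = avg
    set s0 := -(PySem.Int.floordiv (-avg * c) 1000) with hs0
    have hceil : (s0 - 1) * 1000 < avg * c ∧ avg * c ≤ s0 * 1000 := by
      have := (PySem.Int.neg_floordiv_neg_eq_iff_of_pos (a := avg * c) (b := 1000) (q := s0)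
        (by norm_num)).mp (by rw [hs0, neg_mul])
      exact this
    have hiff := pvBS_iff c avg hpos (10 * c + 1 - 0).toNat 0 (10 * c) rfl
    rcases Bool.eq_false_or_eq_true (pvBS c avg 0 (10 * c)) with htrue | hfalse
    · rw [htrue]
      obtain ⟨s, hs1, hs2, hs3⟩ := hiff.mp htrue
      rw [pv_f_eq_iff c s avg hpos] at hs3
      have hs0le : s0 ≤ s := by
        -- avg*c ≤ s*1000 and (s0-1)*1000 < avg*c
        have h1 := hceil.1
        have h2 := hs3.1
        omega
      have hcand : avg * c ≤ (if s0 < 0 then (0:Int) else s0) * 1000 ∧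
          (if s0 < 0 then (0:Int) else s0) * 1000 < (avg + 1) * c := by
        have hup : (avg + 1) * c = avg * c + c := by ring
        constructor
        · split
          · have := hceil.2; omega
          · exact hceil.2
        · have : (if s0 < 0 then (0:Int) else s0) * 1000 ≤ s * 1000 := by split <;> omega
          omega
      symm
      rw [Bool.and_eq_true_iff]
      refine ⟨by simp only [decide_eq_true_eq]; split <;> omega,
        by rw [beq_iff_eq, pv_f_eq_iff c _ avg hpos]; exact hcand⟩
    · rw [hfalse]
      symm
      rw [Bool.and_eq_false_iff]
      by_cases hlo : (if s0 < 0 then (0:Int) else s0) ≤ 10 * c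
      · right
        rw [beq_eq_false_iff_ne]
        intro habs
        exact absurd (hiff.mpr ⟨(if s0 < 0 then (0:Int) else s0), by split <;> omega, hlo, habs⟩) (by simp [hfalse])
      · left; rw [decide_eq_false_iff_not]; exact hlo

-- ===== VERDICT (by name: the statement is the Claim_ definition above) =====
theorem check_spec : Claim_equal_check := by
  intro cnt_people averages hdom hpre
  clear hdom
  unfold Spec_check
  induction averages with
  | nil => rfl
  | cons avg rest ih =>
    have hc : cnt_people ≠ 0 := by
      rcases hpre with h | h
      · cases h
      · exact h
    have hrest : check cnt_people rest = check_alt cnt_people rest := ih (Or.inr hc)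
    show (if pvBS cnt_people avg 0 (10 * cnt_people) then check cnt_people rest else false) = _
    rw [pv_elem_eq cnt_people avg hc, hrest]
    rcases Bool.eq_false_or_eq_true ((if -(PySem.Int.floordiv (-avg * cnt_people) 1000) < 0 then (0:Int) else -(PySem.Int.floordiv (-avg * cnt_people) 1000)) ≤ 10 * cnt_people
        && (PySem.Int.floordiv ((if -(PySem.Int.floordiv (-avg * cnt_people) 1000) < 0 then (0:Int) else -(PySem.Int.floordiv (-avg * cnt_people) 1000)) * 1000) cnt_people == avg)) with h | h <;>
      simp [check_alt, h]
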